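-- pv_equiv track=rewrite | github.com/archanakalburgi/Algorithms | summer_prep/bounded_square_sum.py | boundedSquareSum
-- ===== SOURCE A (Python) =====
-- def boundedSquareSum(a, b, lower, upper):
--     count = 0
--     for i in range(len(a)):
--         if a[i]*a[i] < upper:
--             for j in range(len(b)):
--                 if lower <= a[i]*a[i] + b[j]*b[j] <= upper:
--                     count = count+1
--     return count
-- ===== SOURCE B (Python) =====
-- def boundedSquareSum(a, b, lower, upper):
--     if lower > upper:
--         return 0
--     bsq = sorted(y * y for y in b)
--
--     def count_le(t):
--         # number of elements of bsq that are <= t (binary search)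
--         lo, hi = 0, len(bsq)
--         while lo < hi:
--             mid = (lo + hi) // 2
--             if bsq[mid] <= t:
--                 lo = mid + 1
--             else:
--                 hi = mid
--         return lo
--
--     total = 0
--     for x in a:
--         s = x * x
--         if s < upper:
--             total += count_le(upper - s) - count_le(lower - s - 1)
--     return total
-- ===== Notes on version B (the rewrite author's own statement) =====
-- stated objective: faster
-- what changed: Replaced the nested scan of b for every element of a by sorting the squares of b once and answering each element of a with two binary searches (count of b-squares <= upper-s minus count <= lower-s-1), with an early return 0 when lower > upper.
import Mathlib
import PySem

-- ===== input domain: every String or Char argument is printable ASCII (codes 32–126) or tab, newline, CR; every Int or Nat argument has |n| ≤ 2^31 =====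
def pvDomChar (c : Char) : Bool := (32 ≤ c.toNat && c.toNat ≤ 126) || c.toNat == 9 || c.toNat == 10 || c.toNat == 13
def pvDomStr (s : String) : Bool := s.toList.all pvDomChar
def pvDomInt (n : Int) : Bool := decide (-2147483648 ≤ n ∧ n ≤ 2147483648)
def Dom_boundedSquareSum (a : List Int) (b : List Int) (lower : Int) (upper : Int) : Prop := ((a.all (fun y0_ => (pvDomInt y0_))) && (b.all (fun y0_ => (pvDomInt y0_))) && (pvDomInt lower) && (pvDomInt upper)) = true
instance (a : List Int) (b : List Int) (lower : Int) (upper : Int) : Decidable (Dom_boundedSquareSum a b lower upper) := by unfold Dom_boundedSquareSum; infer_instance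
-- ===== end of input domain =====

-- B replaces A's nested O(n*m) scan by sorting the squares of b once and binary-searching
-- two counts per element of a (objective: faster, asymptotic).

-- ===== PORT A =====
def boundedSquareSum (a : List Int) (b : List Int) (lower : Int) (upper : Int) : Int :=
  (PySem.List.pyRange 0 a.length 1).foldl (fun count i =>
    let ai := PySem.List.pyGetD a i 0
    if ai * ai < upper then
      (PySem.List.pyRange 0 b.length 1).foldl (fun c j =>
        let bj := PySem.List.pyGetD b j 0
        if lower ≤ ai * ai + bj * bj ∧ ai * ai + bj * bj ≤ upper then c + 1 else c) count
    else count) 0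

-- ===== PORT B =====
-- Source B's count_le: binary search on the sorted list, returns the final `lo`
def bsCountLE (l : List Int) (t : Int) (lo hi : Nat) : Nat :=
  if lo < hi then
    let mid := (lo + hi) / 2
    if PySem.List.pyGetD l (mid : Int) 0 ≤ t then bsCountLE l t (mid + 1) hi
    else bsCountLE l t lo mid
  else lo
termination_by hi - lo
decreasing_by all_goals omega

def boundedSquareSum_alt (a : List Int) (b : List Int) (lower : Int) (upper : Int) : Int :=
  if lower > upper then 0
  else
    let bsq := PySem.List.sorted (b.map (fun y => y * y)) (fun x => x) false
    a.foldl (fun total x =>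
      let s := x * x
      if s < upper then
        total + ((bsCountLE bsq (upper - s) 0 bsq.length : Int)
                  - (bsCountLE bsq (lower - s - 1) 0 bsq.length : Int))
      else total) 0

-- ===== PRECONDITION & SPEC =====
def Spec_boundedSquareSum (a : List Int) (b : List Int) (lower : Int) (upper : Int) (out : Int) : Prop := out = boundedSquareSum_alt a b lower upper
instance (a : List Int) (b : List Int) (lower : Int) (upper : Int) (out : Int) : Decidable (Spec_boundedSquareSum a b lower upper out) := by unfold Spec_boundedSquareSum; infer_instance

-- ===== CLAIM (what is proved, stated in full; the proofs are below) =====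
def Claim_equal_boundedSquareSum : Prop := ∀ (a : List Int) (b : List Int) (lower : Int) (upper : Int), Dom_boundedSquareSum a b lower upper → Spec_boundedSquareSum a b lower upper (boundedSquareSum a b lower upper)

-- ===== LEMMAS AND PROOFS =====

-- a list whose first k elements are exactly the ones ≤ t has countP (≤ t) = k
lemma countP_prefix (t : Int) : ∀ (l : List Int) (k : Nat), k ≤ l.length →
    (∀ i (h : i < l.length), l[i] ≤ t ↔ i < k) →
    l.countP (fun x => decide (x ≤ t)) = k := by
  intro l
  induction l with
  | nil => intro k hk _; simp at hk; simp [hk]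
  | cons x xs ih =>
    intro k hk h
    cases k with
    | zero =>
      have hx : ¬ x ≤ t := by
        have := h 0 (by simp); simpa using this
      have : xs.countP (fun x => decide (x ≤ t)) = 0 := by
        apply ih 0 (by omega)
        intro i hi
        have := h (i + 1) (by simpa using by omega)
        simpa using this
      simp [List.countP_cons, hx, this]
    | succ k' =>
      have hx : x ≤ t := by
        have := h 0 (by simp)
        simpa using this.mpr (by omega)
      have hxs : xs.countP (fun x => decide (x ≤ t)) = k' := by
        apply ih k' (by simpa using hk)
        intro i hi
        have := h (i + 1) (by simpa using by omega)
        simpa [Nat.succ_lt_succ_iff] using this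
      simp [List.countP_cons, hx, hxs]

-- binary-search correctness: under the loop invariant it computes countP (≤ t)
lemma bsCountLE_spec (l : List Int) (t : Int) (hs : l.Pairwise (· ≤ ·)) :
    ∀ (n lo hi : Nat), hi - lo = n → hi ≤ l.length → lo ≤ hi →
    (∀ i (h : i < l.length), i < lo → l[i] ≤ t) →
    (∀ i (h : i < l.length), hi ≤ i → ¬ l[i] ≤ t) →
    bsCountLE l t lo hi = l.countP (fun x => decide (x ≤ t)) := by
  intro n
  induction n using Nat.strong_induction_on with
  | _ n ih =>
    intro lo hi hn hhi hlohi h1 h2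
    rw [bsCountLE]
    by_cases hlt : lo < hi
    · simp only [hlt, if_true]
      have hmidlt : (lo + hi) / 2 < l.length := by omega
      have hget : PySem.List.pyGetD l (((lo + hi) / 2 : Nat) : Int) 0 = l[(lo + hi) / 2] := by
        rw [PySem.List.pyGetD_natCast]
        exact List.getD_eq_getElem l 0 hmidlt
      rw [hget]
      have hpw := List.pairwise_iff_getElem.mp hs
      by_cases hm : l[(lo + hi) / 2] ≤ t
      · simp only [hm, if_true]
        apply ih (hi - ((lo + hi) / 2 + 1)) (by omega) _ _ rfl hhi (by omega)
        · intro i hilen hilo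
          rcases Nat.lt_or_ge i ((lo + hi) / 2) with hc | hc
          · exact le_trans (hpw i ((lo + hi) / 2) hilen hmidlt hc) hm
          · have hieq : i = (lo + hi) / 2 := by omega
            subst hieq; exact hm
        · exact h2
      · simp only [hm, if_false]
        apply ih ((lo + hi) / 2 - lo) (by omega) _ _ rfl (by omega) (by omega)
        · exact h1
        · intro i hilen hile
          intro hle
          apply hm
          rcases Nat.lt_or_ge ((lo + hi) / 2) i with hc | hc
          · exact le_trans (hpw ((lo + hi) / 2) i hmidlt hilen hc) hle
          · have hieq : i = (lo + hi) / 2 := by omega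
            subst hieq; exact hle
    · simp only [hlt, if_false]
      refine (countP_prefix t l lo (by omega) ?_).symm
      intro i h
      exact ⟨fun hle => by by_contra hge; exact h2 i h (by omega) hle, fun hlt' => h1 i h hlt'⟩

-- count splitting: countP p = countP q + countP (p ∧ ¬q) when q implies p
lemma countP_split (l : List Int) (p q : Int → Bool) (h : ∀ x ∈ l, q x = true → p x = true) :
    l.countP p = l.countP q + l.countP (fun x => p x && !q x) := by
  induction l with
  | nil => simp
  | cons x xs ih =>
    have hx := h x (by simp)
    have hxs : ∀ y ∈ xs, q y = true → p y = true := fun y hy => h y (by simp [hy])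
    by_cases hq : q x = true
    · simp [List.countP_cons, hq, hx hq, ih hxs]; omega
    · by_cases hp : p x = true <;>
        simp [List.countP_cons, hq, hp, ih hxs] <;> omega

-- A's inner loop counts
lemma inner_fold_count (bl : List Int) (P : Int → Prop) [DecidablePred P] :
    ∀ (c : Int), bl.foldl (fun c y => if P y then c + 1 else c) c
      = c + bl.countP (fun y => decide (P y)) := by
  induction bl with
  | nil => intro c; simp
  | cons y ys ih =>
    intro c
    by_cases hy : P y <;> simp [List.foldl_cons, hy, ih, List.countP_cons] <;> push_cast <;> ring

-- the per-element contribution of A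
def gA (b : List Int) (lower upper x : Int) : Int :=
  if x * x < upper then
    (b.countP (fun y => decide (lower ≤ x * x + y * y ∧ x * x + y * y ≤ upper)) : Int)
  else 0

-- A as a sum over a
lemma A_eq_sum (a b : List Int) (lower upper : Int) :
    boundedSquareSum a b lower upper = (a.map (gA b lower upper)).sum := by
  have hstep : ∀ (x init : Int),
      (if x * x < upper then
        (PySem.List.pyRange 0 (b.length : Int) 1).foldl (fun c j =>
          if lower ≤ x * x + (PySem.List.pyGetD b j 0) * (PySem.List.pyGetD b j 0) ∧
             x * x + (PySem.List.pyGetD b j 0) * (PySem.List.pyGetD b j 0) ≤ upper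
          then c + 1 else c) init
      else init) = init + gA b lower upper x := by
    intro x init
    by_cases hx : x * x < upper
    · have h2 : (PySem.List.pyRange 0 (b.length : Int) 1).foldl (fun c j =>
          if lower ≤ x * x + (PySem.List.pyGetD b j 0) * (PySem.List.pyGetD b j 0) ∧
             x * x + (PySem.List.pyGetD b j 0) * (PySem.List.pyGetD b j 0) ≤ upper
          then c + 1 else c) init
          = b.foldl (fun c y =>
              if lower ≤ x * x + y * y ∧ x * x + y * y ≤ upper then c + 1 else c) init :=
        PySem.List.foldl_pyRange_zero_pyGetD' b 0
          (fun c y => if lower ≤ x * x + y * y ∧ x * x + y * y ≤ upper then c + 1 else c) init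
    
      rw [if_pos hx, h2,
        inner_fold_count b (fun y => lower ≤ x * x + y * y ∧ x * x + y * y ≤ upper),
        gA, if_pos hx]
    · rw [if_neg hx, gA, if_neg hx]; ring
  have hfold : ∀ (l : List Int) (init : Int),
      l.foldl (fun count ai =>
        if ai * ai < upper then
          (PySem.List.pyRange 0 (b.length : Int) 1).foldl (fun c j =>
            if lower ≤ ai * ai + (PySem.List.pyGetD b j 0) * (PySem.List.pyGetD b j 0) ∧
               ai * ai + (PySem.List.pyGetD b j 0) * (PySem.List.pyGetD b j 0) ≤ upper
            then c + 1 else c) count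
        else count) init = init + (l.map (gA b lower upper)).sum := by
    intro l
    induction l with
    | nil => intro init; simp
    | cons x xs ih =>
      intro init
      simp only [List.foldl_cons, List.map_cons, List.sum_cons]
      rw [hstep x init, ih]; ring
  have h1 : boundedSquareSum a b lower upper
      = a.foldl (fun count ai =>
          if ai * ai < upper then
            (PySem.List.pyRange 0 (b.length : Int) 1).foldl (fun c j =>
              if lower ≤ ai * ai + (PySem.List.pyGetD b j 0) * (PySem.List.pyGetD b j 0) ∧
                 ai * ai + (PySem.List.pyGetD b j 0) * (PySem.List.pyGetD b j 0) ≤ upper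
              then c + 1 else c) count
          else count) 0 :=
    PySem.List.foldl_pyRange_zero_pyGetD' a 0
      (fun count ai =>
        if ai * ai < upper then
          (PySem.List.pyRange 0 (b.length : Int) 1).foldl (fun c j =>
            if lower ≤ ai * ai + (PySem.List.pyGetD b j 0) * (PySem.List.pyGetD b j 0) ∧
               ai * ai + (PySem.List.pyGetD b j 0) * (PySem.List.pyGetD b j 0) ≤ upper
            then c + 1 else c) count
        else count) 0
  rw [h1, hfold]; simp

-- B as a sum over a
def bsqOf (b : List Int) : List Int :=
  PySem.List.sorted (b.map (fun y => y * y)) (fun x => x) false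

def gB (b : List Int) (lower upper x : Int) : Int :=
  if x * x < upper then
    ((bsCountLE (bsqOf b) (upper - x * x) 0 (bsqOf b).length : Int)
      - (bsCountLE (bsqOf b) (lower - x * x - 1) 0 (bsqOf b).length : Int))
  else 0

lemma B_eq_sum (a b : List Int) (lower upper : Int) (h : ¬ lower > upper) :
    boundedSquareSum_alt a b lower upper = (a.map (gB b lower upper)).sum := by
  have key : ∀ (init : Int), a.foldl (fun total x =>
      if x * x < upper then
        total + ((bsCountLE (bsqOf b) (upper - x * x) 0 (bsqOf b).length : Int)
                  - (bsCountLE (bsqOf b) (lower - x * x - 1) 0 (bsqOf b).length : Int))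
      else total) init = init + (a.map (gB b lower upper)).sum := by
    induction a with
    | nil => intro init; simp
    | cons x xs ih =>
      intro init
      simp only [List.foldl_cons, List.map_cons, List.sum_cons]
      by_cases hx : x * x < upper
      · rw [if_pos hx, ih, gB, if_pos hx]; ring
      · rw [if_neg hx, ih, gB, if_neg hx]; ring
  unfold boundedSquareSum_alt
  rw [if_neg h]
  show a.foldl (fun total x =>
      if x * x < upper then
        total + ((bsCountLE (bsqOf b) (upper - x * x) 0 (bsqOf b).length : Int)
                  - (bsCountLE (bsqOf b) (lower - x * x - 1) 0 (bsqOf b).length : Int))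
      else total) 0 = _
  rw [key 0]; ring

-- binary search on the sorted squares counts exactly
lemma bsCountLE_counts (b : List Int) (t : Int) :
    (bsCountLE (bsqOf b) t 0 (bsqOf b).length : Int)
      = b.countP (fun y => decide (y * y ≤ t)) := by
  have hs : (bsqOf b).Pairwise (· ≤ ·) := by
    have := PySem.List.sorted_pairwise (b.map (fun y => y * y)) (fun x => x)
    exact this
  have h1 : bsCountLE (bsqOf b) t 0 (bsqOf b).length
      = (bsqOf b).countP (fun x => decide (x ≤ t)) := by
    apply bsCountLE_spec (bsqOf b) t hs ((bsqOf b).length) 0 (bsqOf b).length rfl le_rfl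
      (by omega)
    · intro i h hlt; omega
    · intro i h hge; omega
  have h2 : (bsqOf b).countP (fun x => decide (x ≤ t))
      = (b.map (fun y => y * y)).countP (fun x => decide (x ≤ t)) :=
    (PySem.List.sorted_perm (b.map (fun y => y * y)) (fun x => x) false).countP_eq _
  rw [h1, h2, List.countP_map]
  rfl

-- pointwise: A's inner count equals B's two-binary-search difference
lemma gA_eq_gB (b : List Int) (lower upper x : Int) (h : lower ≤ upper) :
    gA b lower upper x = gB b lower upper x := by
  unfold gA gB
  by_cases hx : x * x < upper
  · rw [if_pos hx, if_pos hx, bsCountLE_counts, bsCountLE_counts]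
    have hsplit := countP_split b (fun y => decide (y * y ≤ upper - x * x))
      (fun y => decide (y * y ≤ lower - x * x - 1))
      (fun y _ hq => by simp at hq ⊢; omega)
    have hcongr : b.countP (fun y => decide (y * y ≤ upper - x * x) && !(decide (y * y ≤ lower - x * x - 1)))
        = b.countP (fun y => decide (lower ≤ x * x + y * y ∧ x * x + y * y ≤ upper)) := by
      apply List.countP_congr
      intro y _
      simp only [Bool.and_eq_true, Bool.not_eq_true', decide_eq_true_eq, decide_eq_false_iff_not,
        decide_eq_decide]
      omega
    simp only [] at hsplit
    rw [← hcongr]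
    omega
  · rw [if_neg hx, if_neg hx]

-- ===== VERDICT (by name: the statement is the Claim_ definition above) =====
theorem boundedSquareSum_spec : Claim_equal_boundedSquareSum := by
  intro a b lower upper _
  unfold Spec_boundedSquareSum
  by_cases h : lower > upper
  · rw [A_eq_sum]
    unfold boundedSquareSum_alt
    rw [if_pos h]
    apply List.sum_eq_zero
    intro z hz
    rcases List.mem_map.mp hz with ⟨x, _, rfl⟩
    unfold gA
    by_cases hx : x * x < upper
    · rw [if_pos hx]
      have : b.countP (fun y => decide (lower ≤ x * x + y * y ∧ x * x + y * y ≤ upper)) = 0 := by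
        simp only [List.countP_eq_zero, decide_eq_true_eq]
        intro y _ hc
        omega
      exact_mod_cast this
    · rw [if_neg hx]
  · rw [A_eq_sum, B_eq_sum a b lower upper h]
    congr 1
    apply List.map_congr_left
    intro x _
    exact gA_eq_gB b lower upper x (by omega)
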